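-- pv_equiv track=rewrite | github.com/IgrMd/yandex-algos-training | Тренировки по алгоритмам 6.0/Лекция 2. Префиксные суммы и два указателя/J.py | detective
-- ===== SOURCE A (Python) =====
-- def detective(n,
--               evidences: list,
--               m, k, order: list):
--     buf = [0] * n
--     r = n - 1
--     l = r
--     same_cnt = 0
--
--     def can_move(ptr):
--         if ptr == 0:
--             return False
--         if evidences[ptr] > evidences[ptr - 1]:
--             return True
--         if evidences[ptr] == evidences[ptr - 1]:
--             return same_cnt < k
--         return False
--
--     while r >= 0:
--         if l > r:
--             l = r
--         while l > 0 and can_move(l):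
--             if evidences[l - 1] == evidences[l]:
--                 same_cnt += 1
--             l -= 1
--
--         buf[r] = l + 1
--         if r > l and evidences[r - 1] == evidences[r]:
--             same_cnt -= 1
--         r -= 1
--
--     ans = [0] * m
--     for i in range(m):
--         ans[i] = buf[order[i] - 1]
--     return ans
-- ===== SOURCE B (Python) =====
-- def detective(n,
--               evidences: list,
--               m, k, order: list):
--     # Prefix-sum / last-decrease formulation with a single forward pointer;
--     # final query loop kept byte-for-byte (including Python's negative indexing).
--     size = n if n > 0 else 0
--     kk = k if k > 0 else 0
--     E = [0] * size        # E[i] = number of equal adjacent pairs among indices 1..i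
--     lastDec = [0] * size  # lastDec[i] = largest j <= i with evidences[j] < evidences[j-1], else 0
--     for i in range(1, size):
--         E[i] = E[i - 1] + (1 if evidences[i] == evidences[i - 1] else 0)
--         lastDec[i] = i if evidences[i] < evidences[i - 1] else lastDec[i - 1]
--     buf = [0] * size
--     p = 0
--     for r in range(size):
--         while E[p] < E[r] - kk:
--             p += 1
--         lo = lastDec[r] if lastDec[r] > p else p
--         buf[r] = lo + 1
--     ans = [0] * m
--     for i in range(m):
--         ans[i] = buf[order[i] - 1]
--     return ans
-- ===== Notes on version B (the rewrite author's own statement) =====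
-- stated objective: alternative
-- what changed: A's right-to-left two-pointer with a live same_cnt counter is replaced by precomputed prefix arrays (equal-pair prefix counts E and last-decrease positions lastDec) scanned left-to-right with a single forward threshold pointer; the query loop is kept as in A.
import Mathlib
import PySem

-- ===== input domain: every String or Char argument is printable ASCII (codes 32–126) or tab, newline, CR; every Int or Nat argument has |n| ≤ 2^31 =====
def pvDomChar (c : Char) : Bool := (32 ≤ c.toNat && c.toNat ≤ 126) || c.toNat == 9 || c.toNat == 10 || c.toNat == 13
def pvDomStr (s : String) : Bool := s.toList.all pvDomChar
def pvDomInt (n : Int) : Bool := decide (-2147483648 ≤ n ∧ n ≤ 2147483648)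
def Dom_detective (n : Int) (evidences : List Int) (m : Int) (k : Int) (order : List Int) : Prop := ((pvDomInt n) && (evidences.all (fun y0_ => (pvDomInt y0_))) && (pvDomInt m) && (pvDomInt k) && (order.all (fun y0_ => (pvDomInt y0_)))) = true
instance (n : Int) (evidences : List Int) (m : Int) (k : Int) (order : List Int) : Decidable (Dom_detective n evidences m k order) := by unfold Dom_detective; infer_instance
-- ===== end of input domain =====

-- B replaces A's right-to-left two-pointer with precomputed prefix arrays (equal-pair
-- prefix counts and last-decrease positions) and a single forward threshold pointer;
-- objective: alternative algorithm, same O(n+m) cost.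

-- ===== PORT A =====
def pvCanMove (evidences : List Int) (k same_cnt : Int) (ptr : Int) : Bool :=
  if ptr = 0 then false
  else if PySem.List.pyGetD evidences ptr 0 > PySem.List.pyGetD evidences (ptr - 1) 0 then true
  else if PySem.List.pyGetD evidences ptr 0 = PySem.List.pyGetD evidences (ptr - 1) 0 then decide (same_cnt < k)
  else false

def pvInnerA (evidences : List Int) (k : Int) (l same_cnt : Int) : Int × Int :=
  if h : 0 < l ∧ pvCanMove evidences k same_cnt l = true then
    pvInnerA evidences k (l - 1)
      (if PySem.List.pyGetD evidences (l - 1) 0 = PySem.List.pyGetD evidences l 0 then same_cnt + 1 else same_cnt)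
  else (l, same_cnt)
termination_by l.toNat
decreasing_by have := h.1; omega

def pvOuterA (evidences : List Int) (k : Int) (r l same_cnt : Int) (buf : List Int) : List Int :=
  if h : 0 ≤ r then
    let l1 := if r < l then r else l
    let p := pvInnerA evidences k l1 same_cnt
    let buf1 := buf.set r.toNat (p.1 + 1)
    let sc1 := if p.1 < r ∧ PySem.List.pyGetD evidences (r - 1) 0 = PySem.List.pyGetD evidences r 0 then p.2 - 1 else p.2
    pvOuterA evidences k (r - 1) p.1 sc1 buf1
  else buf
termination_by (r+1).toNat
decreasing_by omega

def detective (n : Int) (evidences : List Int) (m : Int) (k : Int) (order : List Int) : List Int :=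
  let buf := pvOuterA evidences k (n - 1) (n - 1) 0 (List.replicate n.toNat 0)
  (PySem.List.pyRange 0 m 1).foldl
    (fun ans i => ans.set i.toNat (PySem.List.pyGetD buf (PySem.List.pyGetD order i 0 - 1) 0))
    (List.replicate m.toNat 0)

-- ===== PORT B =====
-- fuel makes Source B's pointer walk total; the walk advances p at most `size` times
def pvMovePtr (E : List Int) (target p : Int) : Nat → Int
  | 0 => p
  | fuel+1 => if PySem.List.pyGetD E p 0 < target then pvMovePtr E target (p + 1) fuel else p

def detective_alt (n : Int) (evidences : List Int) (m : Int) (k : Int) (order : List Int) : List Int :=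
  let size : Int := if 0 < n then n else 0
  let kk : Int := if 0 < k then k else 0
  let EL := (PySem.List.pyRange 1 size 1).foldl
      (fun (s : List Int × List Int) i =>
        (s.1.set i.toNat (PySem.List.pyGetD s.1 (i - 1) 0 +
            (if PySem.List.pyGetD evidences i 0 = PySem.List.pyGetD evidences (i - 1) 0 then 1 else 0)),
         s.2.set i.toNat (if PySem.List.pyGetD evidences i 0 < PySem.List.pyGetD evidences (i - 1) 0 then i
            else PySem.List.pyGetD s.2 (i - 1) 0)))
      (List.replicate size.toNat 0, List.replicate size.toNat 0)
  let bufp := (PySem.List.pyRange 0 size 1).foldl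
      (fun (s : List Int × Int) r =>
        let p := pvMovePtr EL.1 (PySem.List.pyGetD EL.1 r 0 - kk) s.2 size.toNat
        let lo := if p < PySem.List.pyGetD EL.2 r 0 then PySem.List.pyGetD EL.2 r 0 else p
        (s.1.set r.toNat (lo + 1), p))
      (List.replicate size.toNat 0, 0)
  (PySem.List.pyRange 0 m 1).foldl
    (fun ans i => ans.set i.toNat (PySem.List.pyGetD bufp.1 (PySem.List.pyGetD order i 0 - 1) 0))
    (List.replicate m.toNat 0)

-- ===== PRECONDITION & SPEC =====
-- Pre_ excludes exactly the inputs where Python A raises IndexError: n ≥ 2 with fewer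
-- than n evidences, m exceeding len(order), or a queried index outside buf's range.
def Pre_detective (n : Int) (evidences : List Int) (m : Int) (k : Int) (order : List Int) : Prop :=
  (n ≤ (evidences.length : Int) ∨ n ≤ 1) ∧ m ≤ (order.length : Int) ∧
  ∀ x ∈ order.take m.toNat, 1 - max n 0 ≤ x ∧ x ≤ max n 0
instance (n : Int) (evidences : List Int) (m : Int) (k : Int) (order : List Int) : Decidable (Pre_detective n evidences m k order) := by unfold Pre_detective; infer_instance

def pvWitness_detective : Int × List Int × Int × Int × List Int := (3, [1, 1, 2], 2, 1, [3, 1])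

def Spec_detective (n : Int) (evidences : List Int) (m : Int) (k : Int) (order : List Int) (out : List Int) : Prop := out = detective_alt n evidences m k order
instance (n : Int) (evidences : List Int) (m : Int) (k : Int) (order : List Int) (out : List Int) : Decidable (Spec_detective n evidences m k order out) := by unfold Spec_detective; infer_instance

-- ===== CLAIM (what is proved, stated in full; the proofs are below) =====
def Claim_equal_detective : Prop := ∀ (n : Int) (evidences : List Int) (m : Int) (k : Int) (order : List Int), Dom_detective n evidences m k order → Pre_detective n evidences m k order → Spec_detective n evidences m k order (detective n evidences m k order)

-- ===== LEMMAS AND PROOFS =====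

-- prefix count of equal adjacent pairs among indices 1..i
def pvEf (ev : List Int) : Nat → Nat
  | 0 => 0
  | i+1 => pvEf ev i + (if ev.getD (i+1) 0 = ev.getD i 0 then 1 else 0)

-- last decrease position ≤ i (0 if none)
def pvDf (ev : List Int) : Nat → Nat
  | 0 => 0
  | i+1 => if ev.getD (i+1) 0 < ev.getD i 0 then i+1 else pvDf ev i

lemma pvEf_mono (ev : List Int) : Monotone (pvEf ev) := by
  apply monotone_nat_of_le_succ
  intro i; simp only [pvEf]; omega

lemma pvDf_le (ev : List Int) (r : Nat) : pvDf ev r ≤ r := by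
  induction r with
  | zero => simp [pvDf]
  | succ r ih => simp only [pvDf]; split <;> omega

lemma pvDf_mono (ev : List Int) : Monotone (pvDf ev) := by
  apply monotone_nat_of_le_succ
  intro i; have := pvDf_le ev i; simp only [pvDf]; split <;> omega

lemma pvDf_dec (ev : List Int) (r : Nat) (h : 0 < pvDf ev r) :
    ev.getD (pvDf ev r) 0 < ev.getD (pvDf ev r - 1) 0 := by
  induction r with
  | zero => simp [pvDf] at h
  | succ r ih =>
    by_cases hlt : ev.getD (r+1) 0 < ev.getD r 0
    · simp only [pvDf, if_pos hlt]
      simpa using hlt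
    · simp only [pvDf, if_neg hlt] at h ⊢
      exact ih h

lemma pvDf_ge_of_dec (ev : List Int) (i r : Nat) (hir : i ≤ r)
    (h : ev.getD i 0 < ev.getD (i - 1) 0) : i ≤ pvDf ev r := by
  have h1 : pvDf ev i = i := by
    cases i with
    | zero => simp [pvDf]
    | succ j => simp only [pvDf]; rw [if_pos]; simpa using h
  calc i = pvDf ev i := h1.symm
    _ ≤ pvDf ev r := pvDf_mono ev hir

def pvValid (ev : List Int) (kk : Nat) (l r : Nat) : Prop :=
  pvDf ev r ≤ l ∧ pvEf ev r - pvEf ev l ≤ kk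

lemma pvEmEx (ev : List Int) (kk r : Nat) : ∃ l, pvEf ev r - pvEf ev l ≤ kk := ⟨r, by omega⟩

-- smallest l with at most kk equal pairs in (l, r]
def pvEm (ev : List Int) (kk r : Nat) : Nat := Nat.find (pvEmEx ev kk r)

lemma pvEm_spec (ev : List Int) (kk r : Nat) : pvEf ev r - pvEf ev (pvEm ev kk r) ≤ kk :=
  Nat.find_spec (pvEmEx ev kk r)

lemma pvEm_le_of (ev : List Int) (kk r l : Nat) (h : pvEf ev r - pvEf ev l ≤ kk) :
    pvEm ev kk r ≤ l := Nat.find_min' (pvEmEx ev kk r) h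

lemma pvEm_le (ev : List Int) (kk r : Nat) : pvEm ev kk r ≤ r :=
  pvEm_le_of ev kk r r (by omega)

lemma pvEm_min (ev : List Int) (kk r l : Nat) (h : l < pvEm ev kk r) :
    kk < pvEf ev r - pvEf ev l := by
  have := Nat.find_min (pvEmEx ev kk r) h
  omega

lemma pvEm_mono (ev : List Int) (kk : Nat) {r r' : Nat} (h : r ≤ r') :
    pvEm ev kk r ≤ pvEm ev kk r' := by
  apply pvEm_le_of
  have h1 := pvEm_spec ev kk r'
  have h2 := pvEf_mono ev h
  omega

-- the common answer: leftmost valid start for right end r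
def pvMv (ev : List Int) (kk r : Nat) : Nat := max (pvDf ev r) (pvEm ev kk r)

lemma pvMv_le (ev : List Int) (kk r : Nat) : pvMv ev kk r ≤ r := by
  have := pvDf_le ev r; have := pvEm_le ev kk r
  simp only [pvMv]; omega

lemma pvMv_valid (ev : List Int) (kk r : Nat) : pvValid ev kk (pvMv ev kk r) r := by
  constructor
  · simp [pvMv]
  · have h1 := pvEm_spec ev kk r
    have h2 := pvEf_mono ev (le_max_right (pvDf ev r) (pvEm ev kk r))
    simp only [pvMv] at *
    omega

lemma pvMv_le_of_valid (ev : List Int) (kk r l : Nat) (h : pvValid ev kk l r) :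
    pvMv ev kk r ≤ l := by
  have h2 := pvEm_le_of ev kk r l h.2
  have h1 := h.1
  simp only [pvMv]; omega

lemma pvValid_shrink (ev : List Int) (kk : Nat) {l r : Nat} (h : pvValid ev kk l (r+1))
    (hlr : l ≤ r) : pvValid ev kk l r := by
  obtain ⟨h1, h2⟩ := h
  have hd : pvDf ev r ≤ pvDf ev (r+1) := pvDf_mono ev (by omega)
  have he : pvEf ev r ≤ pvEf ev (r+1) := pvEf_mono ev (by omega)
  exact ⟨by omega, by omega⟩

lemma pvValid_refl (ev : List Int) (kk r : Nat) : pvValid ev kk r r :=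
  ⟨pvDf_le ev r, by omega⟩

-- A's inner loop reaches exactly pvMv, with the matching pair count
lemma pvInnerA_eq (ev : List Int) (k : Int) (l r : Nat)
    (hlr : l ≤ r) (hv : pvValid ev k.toNat l r) :
    pvInnerA ev k (l : Int) ((pvEf ev r - pvEf ev l : Nat) : Int)
      = (((pvMv ev k.toNat r : Nat) : Int), ((pvEf ev r - pvEf ev (pvMv ev k.toNat r) : Nat) : Int)) := by
  induction l with
  | zero =>
    rw [pvInnerA, dif_neg (by simp)]
    have hM : pvMv ev k.toNat r = 0 := Nat.le_zero.mp (pvMv_le_of_valid ev k.toNat r 0 hv)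
    simp [hM]
  | succ l ih =>
    have hgetS : PySem.List.pyGetD ev ((l+1:Nat):Int) 0 = ev.getD (l+1) 0 :=
      PySem.List.pyGetD_natCast ev (l+1) 0
    have hptr : ((l+1:Nat):Int) - 1 = ((l:Nat):Int) := by omega
    have hgetP : PySem.List.pyGetD ev (((l+1:Nat):Int) - 1) 0 = ev.getD l 0 := by
      rw [hptr]; exact PySem.List.pyGetD_natCast ev l 0
    have hpos : (0:Int) < ((l+1:Nat):Int) := by exact_mod_cast Nat.succ_pos l
    have hEfle : pvEf ev (l+1) ≤ pvEf ev r := pvEf_mono ev hlr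
    rcases lt_trichotomy (ev.getD (l+1) 0) (ev.getD l 0) with hlt | heq | hgt
    · -- decrease at l+1: loop stops, answer is l+1
      have hcm : pvCanMove ev k ((pvEf ev r - pvEf ev (l+1) : Nat) : Int) ((l+1:Nat):Int) = false := by
        simp only [pvCanMove, hgetS, hgetP]
        rw [if_neg (by positivity), if_neg (by omega), if_neg (by omega)]
      rw [pvInnerA, dif_neg (by rw [hcm]; simp)]
      have hM1 : pvMv ev k.toNat r ≤ l + 1 := pvMv_le_of_valid ev k.toNat r (l+1) hv
      have hM2 : l + 1 ≤ pvMv ev k.toNat r :=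
        le_trans (pvDf_ge_of_dec ev (l+1) r hlr (by simpa using hlt)) (le_max_left _ _)
      have hM : pvMv ev k.toNat r = l + 1 := le_antisymm hM1 hM2
      rw [hM]
    · -- equal pair at l+1
      by_cases hsck : ((pvEf ev r - pvEf ev (l+1) : Nat) : Int) < k
      · -- may move: same_cnt += 1
        have hEf : pvEf ev (l+1) = pvEf ev l + 1 := by
          simp only [pvEf]; rw [if_pos heq]
        have hcm : pvCanMove ev k ((pvEf ev r - pvEf ev (l+1) : Nat) : Int) ((l+1:Nat):Int) = true := by
          simp only [pvCanMove, hgetS, hgetP]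
          rw [if_neg (by positivity), if_neg (by omega), if_pos heq]
          simpa using hsck
        rw [pvInnerA, dif_pos ⟨hpos, hcm⟩]
        rw [hgetP, hgetS, if_pos heq.symm, hptr]
        have hsc : ((pvEf ev r - pvEf ev (l+1) : Nat) : Int) + 1
            = ((pvEf ev r - pvEf ev l : Nat) : Int) := by
          omega
        rw [hsc]
        apply ih (by omega)
        constructor
        · have h1 := hv.1
          rcases Nat.lt_or_ge (pvDf ev r) (l+1) with h2 | h2
          · omega
          · have hD : pvDf ev r = l + 1 := by omega
            have := pvDf_dec ev r (by omega)
            rw [hD, Nat.add_sub_cancel] at this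
            omega
        · have hk : (0:Int) < k := lt_of_le_of_lt (by positivity) hsck
          have hkk : (k.toNat : Int) = k := Int.toNat_of_nonneg (le_of_lt hk)
          have h2 := hv.2
          omega
      · -- equal but quota reached: stop, answer is l+1
        have hcm : pvCanMove ev k ((pvEf ev r - pvEf ev (l+1) : Nat) : Int) ((l+1:Nat):Int) = false := by
          simp only [pvCanMove, hgetS, hgetP]
          rw [if_neg (by positivity), if_neg (by omega), if_pos heq]
          simpa using hsck
        rw [pvInnerA, dif_neg (by rw [hcm]; simp)]
        have hEf : pvEf ev (l+1) = pvEf ev l + 1 := by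
          simp only [pvEf]; rw [if_pos heq]
        have hM1 : pvMv ev k.toNat r ≤ l + 1 := pvMv_le_of_valid ev k.toNat r (l+1) hv
        have hM2 : l + 1 ≤ pvMv ev k.toNat r := by
          have hEm : l + 1 ≤ pvEm ev k.toNat r := by
            by_contra hcon
            have hle : pvEm ev k.toNat r ≤ l := by omega
            have h1 := pvEm_spec ev k.toNat r
            have h2 := pvEf_mono ev hle
            have h3 : pvEf ev r - pvEf ev l ≤ k.toNat := by omega
            omega
          exact le_trans hEm (le_max_right _ _)
        have hM : pvMv ev k.toNat r = l + 1 := le_antisymm hM1 hM2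
        rw [hM]
    · -- strict increase at l+1: move without counting
      have hEf : pvEf ev (l+1) = pvEf ev l := by
        simp only [pvEf]; rw [if_neg (by omega), Nat.add_zero]
      have hcm : pvCanMove ev k ((pvEf ev r - pvEf ev (l+1) : Nat) : Int) ((l+1:Nat):Int) = true := by
        simp only [pvCanMove, hgetS, hgetP]
        rw [if_neg (by positivity), if_pos (by omega)]
      rw [pvInnerA, dif_pos ⟨hpos, hcm⟩]
      rw [hgetP, hgetS, if_neg (by omega), hptr, hEf]
      apply ih (by omega)
      constructor
      · have h1 := hv.1
        rcases Nat.lt_or_ge (pvDf ev r) (l+1) with h2 | h2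
        · omega
        · have hD : pvDf ev r = l + 1 := by omega
          have := pvDf_dec ev r (by omega)
          rw [hD, Nat.add_sub_cancel] at this
          omega
      · have h2 := hv.2
        rw [hEf] at h2
        exact h2

-- A's outer loop fills 0..r with pvMv + 1
def pvFillA (ev : List Int) (kk : Nat) : Nat → List Int → List Int
  | 0, buf => buf.set 0 ((pvMv ev kk 0 : Int) + 1)
  | r+1, buf => pvFillA ev kk r (buf.set (r+1) ((pvMv ev kk (r+1) : Int) + 1))

lemma pvOuterA_run (ev : List Int) (k : Int) (rN : Nat) :
    ∀ (buf : List Int) (lN : Nat), lN ≤ rN + 1 → pvValid ev k.toNat (min lN rN) rN →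
    pvOuterA ev k (rN : Int) (lN : Int) ((pvEf ev rN - pvEf ev (min lN rN) : Nat) : Int) buf
      = pvFillA ev k.toNat rN buf := by
  induction rN with
  | zero =>
    intro buf lN hlN hv
    have hmin : min lN 0 = 0 := Nat.min_zero lN
    rw [hmin]
    rw [pvOuterA, dif_pos (by omega)]
    have hl1 : (if ((0:Nat):Int) < (lN:Int) then ((0:Nat):Int) else (lN:Int)) = (((0:Nat)):Int) := by
      split_ifs with h <;> omega
    simp only [hl1]
    have hM0 : pvMv ev k.toNat 0 = 0 := Nat.le_zero.mp (pvMv_le ev k.toNat 0)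
    have hinner := pvInnerA_eq ev k 0 0 (le_refl 0) (pvValid_refl ev k.toNat 0)
    simp only [hinner, hM0]
    rw [if_neg (by simp)]
    rw [pvOuterA, dif_neg (by omega)]
    simp [pvFillA, hM0]
  | succ r ih =>
    intro buf lN hlN hv
    rw [pvOuterA, dif_pos (by omega)]
    have hl1 : (if ((r+1:Nat):Int) < (lN:Int) then ((r+1:Nat):Int) else (lN:Int))
        = ((min lN (r+1) : Nat):Int) := by
      split_ifs with h
      · have hm : min lN (r+1) = r+1 := by omega
        rw [hm]
      · have hm : min lN (r+1) = lN := by omega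
        rw [hm]
    simp only [hl1]
    have hinner := pvInnerA_eq ev k (min lN (r+1)) (r+1) (by omega) hv
    simp only [hinner]
    have hMle : pvMv ev k.toNat (r+1) ≤ r + 1 := pvMv_le ev k.toNat (r+1)
    have hEfm : pvEf ev (pvMv ev k.toNat (r+1)) ≤ pvEf ev (r+1) := pvEf_mono ev hMle
    have htN : ((r+1:Nat):Int).toNat = r + 1 := by omega
    have hr1 : ((r+1:Nat):Int) - 1 = ((r:Nat):Int) := by omega
    have hgetR1 : PySem.List.pyGetD ev (((r+1:Nat):Int) - 1) 0 = ev.getD r 0 := by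
      rw [hr1]; exact PySem.List.pyGetD_natCast ev r 0
    have hgetR : PySem.List.pyGetD ev ((r+1:Nat):Int) 0 = ev.getD (r+1) 0 :=
      PySem.List.pyGetD_natCast ev (r+1) 0
    have hfill : pvFillA ev k.toNat (r+1) buf
        = pvFillA ev k.toNat r (buf.set (r+1) ((pvMv ev k.toNat (r+1) : Int) + 1)) := rfl
    rw [hfill, htN]
    rcases Nat.lt_or_ge (pvMv ev k.toNat (r+1)) (r+1) with hMlt | hMge
    · -- answer strictly left of r+1: window survives; count adjusted when pair (r,r+1) is equal
      have hEfm2 : pvEf ev (pvMv ev k.toNat (r+1)) ≤ pvEf ev r := pvEf_mono ev (by omega)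
      have hvalid2 : pvValid ev k.toNat (min (pvMv ev k.toNat (r+1)) r) r := by
        have hm : min (pvMv ev k.toNat (r+1)) r = pvMv ev k.toNat (r+1) := by omega
        rw [hm]
        exact pvValid_shrink ev k.toNat (pvMv_valid ev k.toNat (r+1)) (by omega)
      by_cases heq : ev.getD (r+1) 0 = ev.getD r 0
      · have hEf : pvEf ev (r+1) = pvEf ev r + 1 := by
          simp only [pvEf]; rw [if_pos heq]
        rw [if_pos ⟨by omega, by rw [hgetR1, hgetR]; omega⟩]
        have hsc : ((pvEf ev (r+1) - pvEf ev (pvMv ev k.toNat (r+1)) : Nat) : Int) - 1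
            = ((pvEf ev r - pvEf ev (min (pvMv ev k.toNat (r+1)) r) : Nat) : Int) := by
          have hm : min (pvMv ev k.toNat (r+1)) r = pvMv ev k.toNat (r+1) := by omega
          rw [hm]; omega
        rw [hr1, hsc]
        exact ih (buf.set (r+1) _) (pvMv ev k.toNat (r+1)) (by omega) hvalid2
      · have hEf : pvEf ev (r+1) = pvEf ev r := by
          simp only [pvEf]; rw [if_neg heq, Nat.add_zero]
        rw [if_neg (by rw [hgetR1, hgetR]; intro hco; exact heq hco.2.symm)]
        have hsc : ((pvEf ev (r+1) - pvEf ev (pvMv ev k.toNat (r+1)) : Nat) : Int)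
            = ((pvEf ev r - pvEf ev (min (pvMv ev k.toNat (r+1)) r) : Nat) : Int) := by
          have hm : min (pvMv ev k.toNat (r+1)) r = pvMv ev k.toNat (r+1) := by omega
          rw [hm, hEf]
        rw [hr1, hsc]
        exact ih (buf.set (r+1) _) (pvMv ev k.toNat (r+1)) (by omega) hvalid2
    · -- answer is r+1 itself: count resets to 0
      have hMeq : pvMv ev k.toNat (r+1) = r + 1 := by omega
      rw [if_neg (by rw [hMeq]; intro hco; omega)]
      have hsc : ((pvEf ev (r+1) - pvEf ev (pvMv ev k.toNat (r+1)) : Nat) : Int)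
          = ((pvEf ev r - pvEf ev (min (r+1) r) : Nat) : Int) := by
        rw [hMeq]
        have hm : min (r+1) r = r := by omega
        rw [hm]
        simp
      rw [hr1, hsc, hMeq]
      exact ih (buf.set (r+1) _) (r+1) (by omega)
        (by have hm : min (r+1) r = r := by omega
            rw [hm]; exact pvValid_refl ev k.toNat r)


-- ---- B side ----

-- entry i of a mapped range, read the Python way
lemma pvReadMap (sz : Nat) (f : Nat → Int) (i : Nat) (hi : i < sz) :
    PySem.List.pyGetD ((List.range sz).map f) ((i : Nat) : Int) 0 = f i := by
  rw [PySem.List.pyGetD_natCast]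
  simp [List.getD_eq_getElem?_getD, hi]

lemma pvSetMap (sz : Nat) (f f2 : Nat → Int) (j : Nat) (v : Int)
    (hother : ∀ i, i ≠ j → f i = f2 i) (hval : f2 j = v) :
    ((List.range sz).map f).set j v = (List.range sz).map f2 := by
  apply List.ext_getElem (by simp)
  intro i h1 h2
  rw [List.getElem_set]
  by_cases hij : j = i
  · rw [if_pos hij]
    simp only [List.getElem_map, List.getElem_range]
    rw [← hij, ← hval]
  · rw [if_neg hij]
    simp only [List.getElem_map, List.getElem_range]
    exact hother i (fun h => hij h.symm)

-- prefix arrays as B builds them (entries ≥ j still hold the initial 0)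
def pvGE (ev : List Int) (sz j : Nat) : List Int :=
  (List.range sz).map (fun i => if i < j then ((pvEf ev i : Nat) : Int) else 0)
def pvGD (ev : List Int) (sz j : Nat) : List Int :=
  (List.range sz).map (fun i => if i < j then ((pvDf ev i : Nat) : Int) else 0)

lemma pvEL_run (ev : List Int) (sz : Nat) :
    ∀ j, 1 ≤ j → j ≤ sz →
    (PySem.List.pyRange 1 (j : Int) 1).foldl
      (fun (s : List Int × List Int) i =>
        (s.1.set i.toNat (PySem.List.pyGetD s.1 (i - 1) 0 +
            (if PySem.List.pyGetD ev i 0 = PySem.List.pyGetD ev (i - 1) 0 then 1 else 0)),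
         s.2.set i.toNat (if PySem.List.pyGetD ev i 0 < PySem.List.pyGetD ev (i - 1) 0 then i
            else PySem.List.pyGetD s.2 (i - 1) 0)))
      (List.replicate sz 0, List.replicate sz 0)
      = (pvGE ev sz j, pvGD ev sz j) := by
  intro j hj1
  induction j, hj1 using Nat.le_induction with
  | base =>
    intro hsz
    rw [show ((1:Nat):Int) = 1 by norm_num, PySem.List.pyRange_one_eq_nil (le_refl 1)]
    simp only [List.foldl_nil]
    refine Prod.ext ?_ ?_
    · apply List.ext_getElem (by simp [pvGE])
      intro i h1 h2
      simp only [pvGE, List.getElem_replicate, List.getElem_map, List.getElem_range]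
      split_ifs with h
      · interval_cases i
        simp [pvEf]
      · rfl
    · apply List.ext_getElem (by simp [pvGD])
      intro i h1 h2
      simp only [pvGD, List.getElem_replicate, List.getElem_map, List.getElem_range]
      split_ifs with h
      · interval_cases i
        simp [pvDf]
      · rfl
  | succ j hj ih =>
    intro hsz
    obtain ⟨i0, rfl⟩ : ∃ i0, j = i0 + 1 := ⟨j - 1, by omega⟩
    have hcast : (((i0+1)+1 : Nat) : Int) = ((i0+1 : Nat) : Int) + 1 := by push_cast; ring
    rw [hcast, PySem.List.pyRange_one_succ_right (by exact_mod_cast hj), List.foldl_append,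
      ih (by omega), List.foldl_cons, List.foldl_nil]
    have htN : (((i0+1 : Nat)) : Int).toNat = i0 + 1 := by omega
    have hm1 : ((i0+1 : Nat) : Int) - 1 = ((i0 : Nat) : Int) := by push_cast; ring
    have hrdE : PySem.List.pyGetD (pvGE ev sz (i0+1)) (((i0+1 : Nat) : Int) - 1) 0
        = ((pvEf ev i0 : Nat) : Int) := by
      rw [hm1, pvGE, pvReadMap sz _ i0 (by omega), if_pos (by omega)]
    have hrdD : PySem.List.pyGetD (pvGD ev sz (i0+1)) (((i0+1 : Nat) : Int) - 1) 0
        = ((pvDf ev i0 : Nat) : Int) := by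
      rw [hm1, pvGD, pvReadMap sz _ i0 (by omega), if_pos (by omega)]
    have hrdev1 : PySem.List.pyGetD ev ((i0+1 : Nat) : Int) 0 = ev.getD (i0+1) 0 :=
      PySem.List.pyGetD_natCast ev (i0+1) 0
    have hrdev0 : PySem.List.pyGetD ev (((i0+1 : Nat) : Int) - 1) 0 = ev.getD i0 0 := by
      rw [hm1]; exact PySem.List.pyGetD_natCast ev i0 0
    simp only [htN, hrdE, hrdD, hrdev1, hrdev0]
    refine Prod.ext ?_ ?_
    · rw [pvGE, pvGE, pvSetMap sz _ _ (i0+1)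
        (v := ((pvEf ev i0 : Nat) : Int) + (if ev.getD (i0+1) 0 = ev.getD i0 0 then 1 else 0))]
      · intro i hne
        by_cases h : i < i0 + 1
        · rw [if_pos h, if_pos (by omega)]
        · rw [if_neg h, if_neg (by omega)]
      · rw [if_pos (by omega)]
        show ((pvEf ev (i0+1) : Nat) : Int) = _
        simp only [pvEf]
        split_ifs <;> push_cast <;> ring
    · rw [pvGD, pvGD, pvSetMap sz _ _ (i0+1)
        (v := if ev.getD (i0+1) 0 < ev.getD i0 0 then ((i0+1 : Nat) : Int) else ((pvDf ev i0 : Nat) : Int))]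
      · intro i hne
        by_cases h : i < i0 + 1
        · rw [if_pos h, if_pos (by omega)]
        · rw [if_neg h, if_neg (by omega)]
      · rw [if_pos (by omega)]
        show ((pvDf ev (i0+1) : Nat) : Int) = _
        simp only [pvDf]
        split_ifs <;> push_cast <;> ring

-- the pointer walk lands exactly on pvEm
lemma pvMovePtr_run (ev : List Int) (kk sz r : Nat) (hr : r < sz) :
    ∀ (fuel p : Nat), p ≤ pvEm ev kk r → pvEm ev kk r - p ≤ fuel →
    pvMovePtr (pvGE ev sz sz) (((pvEf ev r : Nat) : Int) - ((kk : Nat) : Int)) ((p : Nat) : Int) fuel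
      = ((pvEm ev kk r : Nat) : Int) := by
  intro fuel
  induction fuel with
  | zero =>
    intro p h1 h2
    have : p = pvEm ev kk r := by omega
    rw [this, pvMovePtr]
  | succ fuel ih =>
    intro p h1 h2
    have hps : p < sz := by
      have := pvEm_le ev kk r; omega
    have hrd : PySem.List.pyGetD (pvGE ev sz sz) ((p : Nat) : Int) 0 = ((pvEf ev p : Nat) : Int) := by
      rw [pvGE, pvReadMap sz _ p hps, if_pos hps]
    rw [pvMovePtr, hrd]
    rcases Nat.lt_or_ge p (pvEm ev kk r) with hlt | hge
    · have hmin := pvEm_min ev kk r p hlt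
      rw [if_pos (by omega)]
      have : ((p : Nat) : Int) + 1 = ((p+1 : Nat) : Int) := by push_cast; ring
      rw [this]
      exact ih (p+1) (by omega) (by omega)
    · have hpe : p = pvEm ev kk r := by omega
      rw [hpe]
      have hspec := pvEm_spec ev kk r
      have hmono : pvEf ev (pvEm ev kk r) ≤ pvEf ev r := pvEf_mono ev (pvEm_le ev kk r)
      rw [if_neg (by omega)]

-- B's main loop fills 0..j-1 with pvMv + 1 and carries the pointer pvEm (j-1)
lemma pvBuf_run (ev : List Int) (k : Int) (sz : Nat) (hsz : 1 ≤ sz) :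
    ∀ j, 1 ≤ j → j ≤ sz →
    (PySem.List.pyRange 0 (j : Int) 1).foldl
      (fun (s : List Int × Int) r =>
        let p := pvMovePtr (pvGE ev sz sz) (PySem.List.pyGetD (pvGE ev sz sz) r 0 - ((k.toNat : Nat) : Int)) s.2 sz
        let lo := if p < PySem.List.pyGetD (pvGD ev sz sz) r 0 then PySem.List.pyGetD (pvGD ev sz sz) r 0 else p
        (s.1.set r.toNat (lo + 1), p))
      (List.replicate sz 0, 0)
      = ((List.range sz).map (fun i => if i < j then ((pvMv ev k.toNat i : Nat) : Int) + 1 else 0),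
         ((pvEm ev k.toNat (j-1) : Nat) : Int)) := by
  intro j hj1
  induction j, hj1 using Nat.le_induction with
  | base =>
    intro hsz1
    rw [show ((1:Nat):Int) = 1 by norm_num, PySem.List.pyRange_one_cons (by norm_num)]
    rw [show (0:Int) + 1 = 1 by norm_num, PySem.List.pyRange_one_eq_nil (le_refl 1),
      List.foldl_cons, List.foldl_nil]
    have hpos : 0 < sz := by omega
    have hrdE : PySem.List.pyGetD (pvGE ev sz sz) (0 : Int) 0 = ((pvEf ev 0 : Nat) : Int) := by
      have h0 := pvReadMap sz (fun i => if i < sz then ((pvEf ev i : Nat) : Int) else 0) 0 hpos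
      simpa [pvGE, hpos] using h0
    have hrdD : PySem.List.pyGetD (pvGD ev sz sz) (0 : Int) 0 = ((pvDf ev 0 : Nat) : Int) := by
      have h0 := pvReadMap sz (fun i => if i < sz then ((pvDf ev i : Nat) : Int) else 0) 0 hpos
      simpa [pvGD, hpos] using h0
    simp only [hrdE, hrdD]
    have hmp : pvMovePtr (pvGE ev sz sz) (((pvEf ev 0 : Nat) : Int) - ((k.toNat : Nat) : Int)) (0 : Int) sz
        = ((pvEm ev k.toNat 0 : Nat) : Int) := by
      have h1 := pvMovePtr_run ev k.toNat sz 0 hpos sz 0 (by omega)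
        (by have := pvEm_le ev k.toNat 0; omega)
      simpa using h1
    rw [hmp]
    have hEm0 : pvEm ev k.toNat 0 = 0 := Nat.le_zero.mp (pvEm_le ev k.toNat 0)
    have hMv0 : pvMv ev k.toNat 0 = 0 := Nat.le_zero.mp (pvMv_le ev k.toNat 0)
    have hDf0 : pvDf ev 0 = 0 := rfl
    rw [hEm0, hDf0, if_neg (by omega)]
    refine Prod.ext ?_ ?_
    · show (List.replicate sz 0).set (((0:Nat):Int)).toNat (((0:Nat):Int) + 1) = _
      rw [show (((0:Nat)) : Int).toNat = 0 by omega]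
      have hrep : List.replicate sz (0:Int) = (List.range sz).map (fun _ => 0) := by
        apply List.ext_getElem (by simp)
        intro i h1 h2
        simp
      rw [hrep, pvSetMap sz _ _ 0 (v := ((0:Nat):Int) + 1)]
      · intro i hne
        rw [if_neg (by omega)]
      · rw [if_pos (by omega), hMv0]
    · show ((0:Nat):Int) = ((pvEm ev k.toNat (1-1) : Nat) : Int)
      norm_num [hEm0]
  | succ j hj ih =>
    intro hsz1
    have hcast : ((j+1 : Nat) : Int) = ((j : Nat) : Int) + 1 := by push_cast; ring
    rw [hcast, PySem.List.pyRange_one_succ_right (by positivity), List.foldl_append,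
      ih (by omega), List.foldl_cons, List.foldl_nil]
    have hjs : j < sz := by omega
    have hrdE : PySem.List.pyGetD (pvGE ev sz sz) ((j : Nat) : Int) 0 = ((pvEf ev j : Nat) : Int) := by
      rw [pvGE, pvReadMap sz _ j hjs, if_pos hjs]
    have hrdD : PySem.List.pyGetD (pvGD ev sz sz) ((j : Nat) : Int) 0 = ((pvDf ev j : Nat) : Int) := by
      rw [pvGD, pvReadMap sz _ j hjs, if_pos hjs]
    simp only [hrdE, hrdD]
    have hEmm : pvEm ev k.toNat (j-1) ≤ pvEm ev k.toNat j := pvEm_mono ev k.toNat (by omega)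
    have hEmj : pvEm ev k.toNat j ≤ j := pvEm_le ev k.toNat j
    have hmp : pvMovePtr (pvGE ev sz sz) (((pvEf ev j : Nat) : Int) - ((k.toNat : Nat) : Int))
        ((pvEm ev k.toNat (j-1) : Nat) : Int) sz = ((pvEm ev k.toNat j : Nat) : Int) :=
      pvMovePtr_run ev k.toNat sz j hjs sz (pvEm ev k.toNat (j-1)) hEmm (by omega)
    rw [hmp]
    have hM : (if ((pvEm ev k.toNat j : Nat) : Int) < ((pvDf ev j : Nat) : Int)
        then ((pvDf ev j : Nat) : Int) else ((pvEm ev k.toNat j : Nat) : Int))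
        = ((pvMv ev k.toNat j : Nat) : Int) := by
      rw [pvMv]
      split_ifs with h
      · have : max (pvDf ev j) (pvEm ev k.toNat j) = pvDf ev j := by omega
        rw [this]
      · have : max (pvDf ev j) (pvEm ev k.toNat j) = pvEm ev k.toNat j := by omega
        rw [this]
    rw [hM]
    refine Prod.ext ?_ ?_
    · rw [show ((j:Nat) : Int).toNat = j by omega]
      rw [pvSetMap sz _ _ j (v := ((pvMv ev k.toNat j : Nat) : Int) + 1)]
      · intro i hne
        by_cases h : i < j
        · rw [if_pos h, if_pos (by omega)]
        · rw [if_neg h, if_neg (by omega)]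
      · rw [if_pos (by omega)]
    · rw [show j + 1 - 1 = j by omega]


-- ---- glue: A's fill equals the canonical buffer ----

lemma pvFillA_getElem? (ev : List Int) (kk : Nat) :
    ∀ r buf j, (pvFillA ev kk r buf)[j]? =
      if j ≤ r ∧ j < buf.length then some (((pvMv ev kk j : Nat) : Int) + 1) else buf[j]? := by
  intro r
  induction r with
  | zero =>
    intro buf j
    rw [pvFillA, List.getElem?_set]
    by_cases hj : j = 0
    · subst hj
      by_cases hl : 0 < buf.length
      · rw [if_pos rfl, if_pos hl, if_pos ⟨le_refl 0, hl⟩]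
      · rw [if_pos rfl, if_neg hl, if_neg (by omega)]
        exact (List.getElem?_eq_none (by omega)).symm
    · rw [if_neg (fun h => hj h.symm), if_neg (by omega)]
  | succ r ih =>
    intro buf j
    rw [pvFillA, ih, List.length_set]
    by_cases h1 : j ≤ r ∧ j < buf.length
    · rw [if_pos h1, if_pos ⟨by omega, h1.2⟩]
    · rw [if_neg h1, List.getElem?_set]
      by_cases h2 : j = r + 1
      · subst h2
        by_cases hl : r + 1 < buf.length
        · rw [if_pos rfl, if_pos hl, if_pos ⟨le_refl _, hl⟩]
        · rw [if_pos rfl, if_neg hl, if_neg (by omega)]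
          exact (List.getElem?_eq_none (by omega)).symm
      · rw [if_neg (fun h => h2 h.symm), if_neg (by omega)]

lemma pvFillA_replicate (ev : List Int) (kk rN : Nat) :
    pvFillA ev kk rN (List.replicate (rN+1) (0 : Int))
      = (List.range (rN+1)).map (fun j => ((pvMv ev kk j : Nat) : Int) + 1) := by
  apply List.ext_getElem?
  intro j
  rw [pvFillA_getElem?]
  by_cases hj : j < rN + 1
  · rw [if_pos (by simp; omega)]
    rw [List.getElem?_map, List.getElem?_range hj]
    rfl
  · rw [if_neg (by simp; omega)]
    rw [List.getElem?_eq_none (by simp; omega), List.getElem?_eq_none (by simp; omega)]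

-- ===== VERDICT (by name: the statement is the Claim_ definition above) =====
theorem detective_spec : Claim_equal_detective := by
  unfold Claim_equal_detective
  intro n ev m k order _ _
  unfold Spec_detective
  show detective n ev m k order = detective_alt n ev m k order
  unfold detective detective_alt
  have hsize : (if (0:Int) < n then n else 0) = ((n.toNat : Nat) : Int) := by
    split_ifs <;> omega
  have hkk : (if (0:Int) < k then k else 0) = ((k.toNat : Nat) : Int) := by
    split_ifs <;> omega
  simp only [hsize, hkk, Int.toNat_natCast]
  rcases Nat.eq_zero_or_pos n.toNat with h0 | hpos
  · -- no suspects: both buffers are empty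
    rw [pvOuterA, dif_neg (by omega)]
    rw [h0]
    rw [show ((0:Nat):Int) = (0:Int) by norm_num]
    rw [PySem.List.pyRange_one_eq_nil (a := 1) (b := 0) (by norm_num),
      PySem.List.pyRange_one_eq_nil (a := 0) (b := 0) (le_refl 0)]
    simp only [List.foldl_nil, List.replicate_zero]
  · -- n ≥ 1
    obtain ⟨rN, hrN⟩ : ∃ rN, n.toNat = rN + 1 := ⟨n.toNat - 1, by omega⟩
    have hn1 : n - 1 = ((rN : Nat) : Int) := by omega
    rw [hrN, hn1]
    have hA := pvOuterA_run ev k rN (List.replicate (rN+1) 0) rN (by omega)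
      (by rw [min_self]; exact pvValid_refl ev k.toNat rN)
    rw [min_self, Nat.sub_self] at hA
    rw [show ((0:Nat):Int) = (0:Int) by norm_num] at hA
    rw [hA, pvFillA_replicate]
    rw [pvEL_run ev (rN+1) (rN+1) (by omega) (le_refl _)]
    simp only []
    rw [pvBuf_run ev k (rN+1) (by omega) (rN+1) (by omega) (le_refl _)]
    simp only []
    have hmap : (List.range (rN+1)).map (fun j => ((pvMv ev k.toNat j : Nat) : Int) + 1)
        = (List.range (rN+1)).map (fun i => if i < rN+1 then ((pvMv ev k.toNat i : Nat) : Int) + 1 else 0) := by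
      apply List.map_congr_left
      intro i hi
      rw [List.mem_range] at hi
      rw [if_pos hi]
    rw [hmap]
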